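-- pv_equiv track=rewrite | github.com/sebacris97/ballstest | ballstest/balls_test_sinCounter.py | solution
-- ===== SOURCE A (Python) =====
-- def solution(s):
--     b_positions = [i for i, c in enumerate(s) if c == 'B']
--     total = len(b_positions)
--
--     if total <= 1:
--         return 0
--
--     required_span = 2 * total - 1
--     length = len(s)
--
--     min_moves = float('inf')
--
--     for start in range(length - required_span + 1):
--         target_positions = [start + 2 * i for i in range(total)]
--
--         # Verificamos si alguna 'B' no deseada ya está en una posición objetivo
--         if any(s[i] == 'B' and i not in b_positions for i in target_positions):
--             continue
--
--         # Contamos cuántas Bs están ya bien posicionadas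
--         already_ok = sum(1 for b in b_positions if b in target_positions)
--
--         moves = total - already_ok
--         min_moves = min(min_moves, moves)
--
--     return min_moves if min_moves != float('inf') else -1
-- ===== SOURCE B (Python) =====
-- def solution(s):
--     total = sum(1 for c in s if c == 'B')
--     if total <= 1:
--         return 0
--     n = len(s)
--     # prefix counts: even[k] / odd[k] = number of 'B' at even / odd indices in s[:k]
--     even = [0]
--     odd = [0]
--     e = 0
--     o = 0
--     for i, c in enumerate(s):
--         if c == 'B':
--             if i % 2 == 0:
--                 e += 1
--             else:
--                 o += 1
--         even.append(e)
--         odd.append(o)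
--     best = -1
--     for start in range(n - 2 * total + 2):
--         end = start + 2 * total - 2
--         pref = even if start % 2 == 0 else odd
--         moves = total - (pref[end + 1] - pref[start])
--         if best < 0 or moves < best:
--             best = moves
--     return best
-- ===== Notes on version B (the rewrite author's own statement) =====
-- stated objective: faster
-- what changed: B replaces A's per-start construction of the target-position list and its quadratic membership scans by two prefix-sum arrays counting the letter B at even and odd indices, computing each window's overlap in O(1); A's always-false guard over target positions disappears.
import Mathlib
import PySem

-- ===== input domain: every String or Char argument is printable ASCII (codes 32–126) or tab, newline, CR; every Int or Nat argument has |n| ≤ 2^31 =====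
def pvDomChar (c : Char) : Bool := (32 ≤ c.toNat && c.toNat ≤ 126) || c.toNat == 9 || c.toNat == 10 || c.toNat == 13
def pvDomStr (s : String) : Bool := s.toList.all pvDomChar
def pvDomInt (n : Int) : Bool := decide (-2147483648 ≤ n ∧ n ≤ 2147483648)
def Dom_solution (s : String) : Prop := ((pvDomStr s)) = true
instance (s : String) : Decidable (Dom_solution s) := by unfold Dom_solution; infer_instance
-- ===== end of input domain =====

-- B replaces A's per-start target-list construction and membership scans by two prefix-sum
-- arrays (B-counts at even / odd positions), computing each window's overlap in O(1); faster.

-- ===== PORT A =====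
-- literal transliteration of Source A; the `s[i]` inside the `any` guard is always in range on the
-- iterated starts (start + 2*i ≤ start + 2*total - 2 < len(s)), so `pyGet? … == some 'B'` is exact.
def solution (s : String) : Int :=
  let bPositions : List Int :=
    ((PySem.List.enumerate s.toList 0).filter (fun p => p.2 == 'B')).map (fun p => p.1)
  let total : Int := PySem.List.len bPositions
  if total ≤ 1 then 0
  else
    let requiredSpan : Int := 2 * total - 1
    let length : Int := PySem.Str.len s
    -- min_moves : none plays float('inf')
    let minMoves : Option Int :=
      (PySem.List.pyRange 0 (length - requiredSpan + 1) 1).foldl (fun acc start =>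
        let targetPositions : List Int :=
          (PySem.List.pyRange 0 total 1).map (fun i => start + 2 * i)
        if targetPositions.any (fun i =>
            (PySem.Str.pyGet? s i == some 'B') && !(bPositions.contains i)) then acc
        else
          let alreadyOk : Int :=
            bPositions.foldl (fun n b => if targetPositions.contains b then n + 1 else n) 0
          let moves := total - alreadyOk
          match acc with
          | none => some moves
          | some m => some (min m moves)) none
    match minMoves with
    | none => -1
    | some m => m

-- ===== PORT B =====
-- literal transliteration of Source B (prefix-sum algorithm); list indexing is always in range.
def solution_alt (s : String) : Int :=
  let total : Int := s.toList.foldl (fun n c => if c == 'B' then n + 1 else n) 0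
  if total ≤ 1 then 0
  else
    let n : Int := PySem.Str.len s
    let st :=
      (PySem.List.enumerate s.toList 0).foldl
        (fun (st : List Int × List Int × Int × Int) ic =>
          let eo :=
            if ic.2 == 'B' then
              (if PySem.Int.mod ic.1 2 = 0 then (st.2.2.1 + 1, st.2.2.2)
               else (st.2.2.1, st.2.2.2 + 1))
            else (st.2.2.1, st.2.2.2)
          (st.1 ++ [eo.1], st.2.1 ++ [eo.2], eo.1, eo.2))
        ([0], [0], 0, 0)
    let evenPref := st.1
    let oddPref := st.2.1
    (PySem.List.pyRange 0 (n - 2 * total + 2) 1).foldl (fun best start =>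
      let stop : Int := start + 2 * total - 2
      let pref := if PySem.Int.mod start 2 = 0 then evenPref else oddPref
      let moves := total - (PySem.List.pyGetD pref (stop + 1) 0 - PySem.List.pyGetD pref start 0)
      if best < 0 ∨ moves < best then moves else best) (-1)

-- ===== PRECONDITION & SPEC =====
def Spec_solution (s : String) (out : Int) : Prop := out = solution_alt s
instance (s : String) (out : Int) : Decidable (Spec_solution s out) := by unfold Spec_solution; infer_instance

-- ===== CLAIM (what is proved, stated in full; the proofs are below) =====
def Claim_equal_solution : Prop := ∀ (s : String), Dom_solution s → Spec_solution s (solution s)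

-- ===== LEMMAS AND PROOFS =====

-- ---- proof-side definitions ----

-- A's list of 'B' positions
def pvBpos (cs : List Char) : List Int :=
  ((PySem.List.enumerate cs 0).filter (fun p => p.2 == 'B')).map (fun p => p.1)

-- number of 'B's at positions j < k of parity p
def pvCnt (cs : List Char) (p k : Int) : Int :=
  ((PySem.List.enumerate cs 0).countP
    (fun q => q.2 == 'B' && decide (q.1 < k) && (PySem.Int.mod q.1 2 == p)) : Int)

-- common clean form of both programs
def pvF (cs : List Char) : Int :=
  let T : Int := (cs.count 'B' : Int)
  if T ≤ 1 then 0 else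
  (PySem.List.pyRange 0 ((cs.length : Int) - 2 * T + 2) 1).foldl (fun best start =>
     let moves := T - (pvCnt cs (PySem.Int.mod start 2) (start + 2 * T - 1)
                        - pvCnt cs (PySem.Int.mod start 2) start)
     if best < 0 ∨ moves < best then moves else best) (-1)


theorem pvBpos_length (cs : List Char) : (pvBpos cs).length = cs.count 'B' := by
  unfold pvBpos
  rw [List.length_map, ← List.countP_eq_length_filter]
  conv_rhs => rw [← PySem.List.map_snd_enumerate cs 0]
  rw [List.count_eq_countP, List.countP_map]
  rfl

theorem pvMem_bpos {cs : List Char} {b : Int} :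
    b ∈ pvBpos cs ↔ ∃ (k : Nat) (h : k < cs.length), b = (k : Int) ∧ cs[k] = 'B' := by
  unfold pvBpos
  simp only [List.mem_map, List.mem_filter, PySem.List.mem_enumerate_iff]
  constructor
  · rintro ⟨x, ⟨⟨k, hk, rfl⟩, hB⟩, rfl⟩
    exact ⟨k, hk, by simp, by simpa using hB⟩
  · rintro ⟨k, hk, rfl, hB⟩
    exact ⟨((k:Int), cs[k]), ⟨⟨k, hk, by simp⟩, by simpa using hB⟩, rfl⟩

theorem pvCountP_split {α : Type} (l : List α) (P Q : α → Bool)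
    (h : ∀ x ∈ l, Q x = true → P x = true) :
    l.countP P = l.countP Q + l.countP (fun x => P x && !Q x) := by
  induction l with
  | nil => rfl
  | cons a t ih =>
    have ht : ∀ x ∈ t, Q x = true → P x = true := fun x hx => h x (List.mem_cons_of_mem a hx)
    have ha := h a (List.mem_cons_self)
    simp only [List.countP_cons, ih ht]
    cases hq : Q a <;> cases hp : P a <;> simp_all <;> omega

theorem pvCnt_eq_countP (cs : List Char) (p k : Int) :
    pvCnt cs p k = (((pvBpos cs).countP
      (fun b => decide (b < k) && (PySem.Int.mod b 2 == p)) : Nat) : Int) := by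
  unfold pvCnt pvBpos
  congr 1
  rw [List.countP_map, List.countP_filter]
  refine List.countP_congr ?_
  intro q _
  simp only [Function.comp]
  cases q.2 == 'B' <;> cases decide (q.1 < k) <;> cases PySem.Int.mod q.1 2 == p <;> rfl

theorem pvCnt_append (cs : List Char) (c : Char) (p k : Int) :
    pvCnt (cs ++ [c]) p k = pvCnt cs p k +
      (if (c == 'B' && decide ((cs.length : Int) < k)
            && (PySem.Int.mod (cs.length : Int) 2 == p)) then 1 else 0) := by
  unfold pvCnt
  rw [PySem.List.enumerate_append, List.countP_append]
  simp [PySem.List.enumerate_cons, PySem.List.enumerate_nil, List.countP_cons]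

theorem pvCnt_of_ge (cs : List Char) (p k : Int) (h : (cs.length : Int) ≤ k) :
    pvCnt cs p k = pvCnt cs p (cs.length : Int) := by
  unfold pvCnt
  congr 1
  refine List.countP_congr ?_
  intro q hq
  obtain ⟨j, hj, rfl⟩ := (PySem.List.mem_enumerate_iff _ _ _).1 hq
  have h1 : ((0:Int) + j) < k := by omega
  have h2 : ((0:Int) + j) < (cs.length : Int) := by omega
  simp
  intro _ _
  omega

theorem pvPrefFold (cs : List Char) :
    (PySem.List.enumerate cs 0).foldl
        (fun (st : List Int × List Int × Int × Int) ic =>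
          let eo :=
            if ic.2 == 'B' then
              (if PySem.Int.mod ic.1 2 = 0 then (st.2.2.1 + 1, st.2.2.2)
               else (st.2.2.1, st.2.2.2 + 1))
            else (st.2.2.1, st.2.2.2)
          (st.1 ++ [eo.1], st.2.1 ++ [eo.2], eo.1, eo.2))
        ([0], [0], 0, 0)
    = ((List.range (cs.length + 1)).map (fun (k : Nat) => pvCnt cs 0 (k : Int)),
       (List.range (cs.length + 1)).map (fun (k : Nat) => pvCnt cs 1 (k : Int)),
       pvCnt cs 0 (cs.length : Int), pvCnt cs 1 (cs.length : Int)) := by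
  induction cs using List.reverseRecOn with
  | nil =>
    simp [PySem.List.enumerate_nil, pvCnt]
  | append_singleton cs c ih =>
    rw [PySem.List.enumerate_append, List.foldl_append, ih]
    have hlen : (cs ++ [c]).length = cs.length + 1 := by simp
    -- the single new element
    simp only [PySem.List.enumerate_cons, PySem.List.enumerate_nil, List.foldl_cons, List.foldl_nil]
    have hstable : ∀ p : Int, ∀ k : Nat, k ≤ cs.length →
        pvCnt (cs ++ [c]) p (k : Int) = pvCnt cs p (k : Int) := by
      intro p k hk
      rw [pvCnt_append]
      have : ¬ ((cs.length : Int) < (k : Int)) := by omega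
      simp [this]
    have hnew : ∀ p : Int,
        pvCnt (cs ++ [c]) p ((cs.length : Int) + 1)
        = pvCnt cs p (cs.length : Int) +
          (if (c == 'B' && (PySem.Int.mod (cs.length : Int) 2 == p)) then 1 else 0) := by
      intro p
      rw [pvCnt_append, pvCnt_of_ge cs p _ (by omega)]
      have : ((cs.length : Int) < (cs.length : Int) + 1) := by omega
      simp [this]
    have hmap : ∀ p : Int,
        (List.range ((cs ++ [c]).length + 1)).map (fun (k : Nat) => pvCnt (cs ++ [c]) p (k : Int))
        = (List.range (cs.length + 1)).map (fun (k : Nat) => pvCnt cs p (k : Int)) ++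
          [pvCnt cs p (cs.length : Int) +
            (if (c == 'B' && (PySem.Int.mod (cs.length : Int) 2 == p)) then 1 else 0)] := by
      intro p
      rw [hlen, List.range_succ, List.map_append]
      congr 1
      · exact List.map_congr_left (fun k hk => hstable p k (by
          exact Nat.lt_succ_iff.mp (List.mem_range.mp hk)))
      · simp only [List.map_cons, List.map_nil]
        rw [show ((cs.length + 1 : Nat) : Int) = (cs.length : Int) + 1 by push_cast; ring]
        rw [hnew]
    have h01 : ((cs.length + 1 : Nat) : Int) = (cs.length : Int) + 1 := by push_cast; ring
    rw [hmap 0, hmap 1, hlen, h01, hnew 0, hnew 1]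
    simp only [zero_add]
    by_cases hc : (c == 'B') = true
    · by_cases hd : (2:Int) ∣ (cs.length : Int)
      · have hm1 : ¬ ((cs.length:Int) % 2 = 1) := by omega
        simp [hc, hd, hm1]
      · have hm1 : ((cs.length:Int) % 2 = 1) := by omega
        simp [hc, hm1]
    · simp [hc]

theorem pvMinFold (f : Int → Int) (L : List Int) (h : ∀ x ∈ L, 0 ≤ f x) :
    L.foldl (fun b x => if b < 0 ∨ f x < b then f x else b) (-1)
    = (match L.foldl (fun acc x =>
          match acc with
          | none => some (f x)
          | some m => some (min m (f x))) (none : Option Int) with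
       | none => -1
       | some m => m) := by
  have s1 : ∀ (M : List Int) (v : Int),
      M.foldl (fun acc x =>
          match acc with
          | none => some (f x)
          | some m => some (min m (f x))) (some v)
      = some (M.foldl (fun m x => min m (f x)) v) := by
    intro M
    induction M with
    | nil => intro v; rfl
    | cons a t ih => intro v; simp only [List.foldl_cons]; exact ih _
  have s2 : ∀ (M : List Int) (v : Int), 0 ≤ v → (∀ x ∈ M, 0 ≤ f x) →
      M.foldl (fun b x => if b < 0 ∨ f x < b then f x else b) v
      = M.foldl (fun m x => min m (f x)) v := by
    intro M
    induction M with
    | nil => intros; rfl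
    | cons a t ih =>
      intro v hv hM
      have ha : 0 ≤ f a := hM a List.mem_cons_self
      simp only [List.foldl_cons]
      have he : (if v < 0 ∨ f a < v then f a else v) = min v (f a) := by
        rw [min_def]; split_ifs <;> omega
      rw [he]
      exact ih _ (le_min hv ha) (fun x hx => hM x (List.mem_cons_of_mem a hx))
  cases L with
  | nil => rfl
  | cons a t =>
    have ha : 0 ≤ f a := h a List.mem_cons_self
    simp only [List.foldl_cons]
    have h1 : (if (-1 : Int) < 0 ∨ f a < -1 then f a else -1) = f a := by
      split_ifs with hh
      · rfl
      · exact absurd (Or.inl (by omega)) hh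
    rw [h1, s1, s2 t (f a) ha (fun x hx => h x (List.mem_cons_of_mem a hx))]


theorem pvWindow (cs : List Char) (T : Int) (hT2 : 2 ≤ T) (start : Int) :
    pvCnt cs (PySem.Int.mod start 2) (start + 2 * T - 1)
      - pvCnt cs (PySem.Int.mod start 2) start
    = (((pvBpos cs).countP (fun b =>
        (decide (b < start + 2 * T - 1) && (PySem.Int.mod b 2 == PySem.Int.mod start 2))
        && !(decide (b < start) && (PySem.Int.mod b 2 == PySem.Int.mod start 2))) : Nat) : Int) := by
  rw [pvCnt_eq_countP, pvCnt_eq_countP]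
  rw [pvCountP_split (pvBpos cs)
      (fun b => decide (b < start + 2 * T - 1) && (PySem.Int.mod b 2 == PySem.Int.mod start 2))
      (fun b => decide (b < start) && (PySem.Int.mod b 2 == PySem.Int.mod start 2))
      (by
        intro b _ hb
        simp only [Bool.and_eq_true, decide_eq_true_eq] at hb ⊢
        exact ⟨by omega, hb.2⟩)]
  push_cast
  ring

theorem pvTargets_contains (T start b : Int) :
    ((List.map (fun i => start + 2 * i) (PySem.List.pyRange 0 T 1)).contains b)
    = ((decide (b < start + 2 * T - 1) && (PySem.Int.mod b 2 == PySem.Int.mod start 2))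
        && !(decide (b < start) && (PySem.Int.mod b 2 == PySem.Int.mod start 2))) := by
  have hm2 : PySem.Int.mod b 2 = b % 2 := PySem.Int.mod_eq_emod_of_pos (by norm_num)
  have hm2' : PySem.Int.mod start 2 = start % 2 := PySem.Int.mod_eq_emod_of_pos (by norm_num)
  rw [List.contains_eq_mem, Bool.eq_iff_iff]
  simp only [hm2, hm2', decide_eq_true_eq, List.mem_map, PySem.List.mem_pyRange_one,
    Bool.and_eq_true, Bool.not_eq_true', Bool.and_eq_false_iff, beq_iff_eq,
    decide_eq_false_iff_not, beq_eq_false_iff_ne]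
  constructor
  · rintro ⟨j, ⟨hj0, hjT⟩, rfl⟩
    refine ⟨⟨by omega, by omega⟩, Or.inl (by omega)⟩
  · rintro ⟨⟨hlt, hpar⟩, hnot⟩
    have hge : start ≤ b := by rcases hnot with h | h <;> omega
    exact ⟨(b - start) / 2, ⟨by omega, by omega⟩, by omega⟩

theorem pvA_eq (s : String) : solution s = pvF s.toList := by
  have hbp : ((PySem.List.enumerate s.toList 0).filter (fun p => p.2 == 'B')).map
      (fun p => p.1) = pvBpos s.toList := rfl
  have hlen : PySem.List.len (pvBpos s.toList) = ((s.toList.count 'B' : Nat) : Int) := by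
    rw [PySem.List.len_eq, pvBpos_length]
  unfold solution pvF
  simp only [hbp, hlen, PySem.Str.len_eq]
  set T : Int := ((s.toList.count 'B' : Nat) : Int) with hT
  by_cases hle : T ≤ 1
  · simp [hle]
  · simp only [if_neg hle]
    have hT2 : 2 ≤ T := by omega
    rw [show (s.toList.length : Int) - (2 * T - 1) + 1 = (s.toList.length : Int) - 2 * T + 2
        by ring]
    set cs := s.toList with hcs
    set L := PySem.List.pyRange 0 ((cs.length : Int) - 2 * T + 2) 1 with hL
    set f : Int → Int := fun start =>
      T - (pvCnt cs (PySem.Int.mod start 2) (start + 2 * T - 1)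
            - pvCnt cs (PySem.Int.mod start 2) start) with hf
    have hTlen : T = ((pvBpos cs).length : Int) := by rw [pvBpos_length]
    have hpos : ∀ x ∈ L, 0 ≤ f x := by
      intro x _
      rw [hf]
      simp only
      rw [pvWindow cs T hT2 x, hTlen]
      exact sub_nonneg.mpr (by exact_mod_cast List.countP_le_length)
    have hA : L.foldl (fun acc start =>
        let targetPositions : List Int :=
          (PySem.List.pyRange 0 T 1).map (fun i => start + 2 * i)
        if targetPositions.any (fun i =>
            (PySem.Str.pyGet? s i == some 'B') && !((pvBpos cs).contains i)) then acc
        else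
          let alreadyOk : Int :=
            (pvBpos cs).foldl (fun n b => if targetPositions.contains b then n + 1 else n) 0
          let moves := T - alreadyOk
          match acc with
          | none => some moves
          | some m => some (min m moves)) (none : Option Int)
      = L.foldl (fun acc start =>
          match acc with
          | none => some (f start)
          | some m => some (min m (f start))) (none : Option Int) := by
      refine PySem.List.foldl_congr_mem _ _ _ _ ?_
      intro acc start hstart
      have hmem := (PySem.List.mem_pyRange_one.mp hstart)
      have h0 : (0:Int) ≤ start := hmem.1
      have h1 : start < (cs.length : Int) - 2 * T + 2 := hmem.2
      -- the guard never fires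
      have hany : ((PySem.List.pyRange 0 T 1).map (fun i => start + 2 * i)).any (fun i =>
          (PySem.Str.pyGet? s i == some 'B') && !((pvBpos cs).contains i)) = false := by
        rw [List.any_eq_false]
        intro i hi
        obtain ⟨j, hj, rfl⟩ := List.mem_map.mp hi
        have hjr := PySem.List.mem_pyRange_one.mp hj
        intro hcontra
        simp only [Bool.and_eq_true, beq_iff_eq, Bool.not_eq_true'] at hcontra
        obtain ⟨hB, hnc⟩ := hcontra
        have hidx : (0:Int) ≤ start + 2 * j := by omega
        have hlt : start + 2 * j < (cs.length : Int) := by omega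
        rw [PySem.Str.pyGet?_eq, ← hcs] at hB
        have hB' : PySem.List.pyGet? cs (start + 2 * j) = some 'B' := hB
        rw [PySem.List.pyGet?_of_nonneg _ hidx] at hB'
        have hklt : (start + 2 * j).toNat < cs.length := by omega
        rw [List.getElem?_eq_getElem hklt] at hB'
        have hmemb : (start + 2 * j) ∈ pvBpos cs := by
          rw [pvMem_bpos]
          exact ⟨(start + 2 * j).toNat, hklt, by omega, by simpa using hB'⟩
        rw [List.contains_eq_mem] at hnc
        simp [hmemb] at hnc
      simp only [hany, Bool.false_eq_true, if_false,
        PySem.List.foldl_if_add_one, zero_add]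
      have hcong : ((pvBpos cs).countP (fun b =>
          ((PySem.List.pyRange 0 T 1).map (fun i => start + 2 * i)).contains b))
          = (pvBpos cs).countP (fun b =>
            (decide (b < start + 2 * T - 1) && (PySem.Int.mod b 2 == PySem.Int.mod start 2))
            && !(decide (b < start) && (PySem.Int.mod b 2 == PySem.Int.mod start 2))) :=
        List.countP_congr (fun b _ => by rw [pvTargets_contains T start b])
      rw [hcong, ← pvWindow cs T hT2 start]
    rw [hA, ← pvMinFold f L hpos]

theorem pvGetPref (cs : List Char) (p : Int) (i : Int) (h0 : 0 ≤ i)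
    (h1 : i ≤ (cs.length : Int)) :
    PySem.List.pyGetD ((List.range (cs.length + 1)).map (fun (k : Nat) => pvCnt cs p (k : Int))) i 0
    = pvCnt cs p i := by
  rw [PySem.List.pyGetD_eq_getElem _ _ h0 (by simp; omega)]
  rw [List.getElem_map, List.getElem_range, Int.toNat_of_nonneg h0]

theorem pvB_eq (s : String) : solution_alt s = pvF s.toList := by
  unfold solution_alt pvF
  have htot : (s.toList.foldl (fun n c => if c == 'B' then n + 1 else n) (0 : Int))
      = (s.toList.count 'B' : Int) := by
    rw [PySem.List.foldl_beq_add_one]; ring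
  simp only [htot, PySem.Str.len_eq, pvPrefFold]
  set T : Int := (s.toList.count 'B' : Int) with hT
  by_cases hle : T ≤ 1
  · simp [hle]
  · simp only [if_neg hle]
    refine PySem.List.foldl_congr_mem _ _ _ _ ?_
    intro best start hstart
    have hmem := (PySem.List.mem_pyRange_one.mp hstart)
    have hT2 : 2 ≤ T := by omega
    have hTn : (0:Int) ≤ T := by positivity
    have hcount_le : T ≤ (s.toList.length : Int) := by
      have := List.count_le_length (l := s.toList) (a := 'B')
      omega
    have h0 : (0:Int) ≤ start := hmem.1
    have h1 : start < (s.toList.length : Int) - 2 * T + 2 := hmem.2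
    have e1 : PySem.List.pyGetD
        ((List.range (s.toList.length + 1)).map (fun (k : Nat) => pvCnt s.toList 0 (k : Int)))
        (start + 2 * T - 2 + 1) 0 = pvCnt s.toList 0 (start + 2 * T - 1) := by
      rw [show start + 2 * T - 2 + 1 = start + 2 * T - 1 by ring]
      exact pvGetPref _ _ _ (by omega) (by omega)
    have e2 : PySem.List.pyGetD
        ((List.range (s.toList.length + 1)).map (fun (k : Nat) => pvCnt s.toList 0 (k : Int)))
        start 0 = pvCnt s.toList 0 start := pvGetPref _ _ _ h0 (by omega)
    have o1 : PySem.List.pyGetD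
        ((List.range (s.toList.length + 1)).map (fun (k : Nat) => pvCnt s.toList 1 (k : Int)))
        (start + 2 * T - 2 + 1) 0 = pvCnt s.toList 1 (start + 2 * T - 1) := by
      rw [show start + 2 * T - 2 + 1 = start + 2 * T - 1 by ring]
      exact pvGetPref _ _ _ (by omega) (by omega)
    have o2 : PySem.List.pyGetD
        ((List.range (s.toList.length + 1)).map (fun (k : Nat) => pvCnt s.toList 1 (k : Int)))
        start 0 = pvCnt s.toList 1 start := pvGetPref _ _ _ h0 (by omega)
    by_cases hm : PySem.Int.mod start 2 = 0
    · rw [hm]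
      simp only [reduceIte]
      rw [e1, e2]
    · have hm1 : PySem.Int.mod start 2 = 1 := by
        have a1 := PySem.Int.mod_nonneg start (b := 2) (by norm_num)
        have a2 := PySem.Int.mod_lt start (b := 2) (by norm_num)
        omega
      rw [hm1, if_neg (by norm_num : ¬((1:Int) = 0))]
      rw [o1, o2]

-- ===== VERDICT (by name: the statement is the Claim_ definition above) =====
theorem solution_spec : Claim_equal_solution := by
  intro s _
  unfold Spec_solution
  rw [pvA_eq, pvB_eq]
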